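-- pv_equiv track=rewrite | github.com/Praneet9/Smart_Editor | Deepblue version/Praneet/Line Detection Script/main.py | line_array
-- ===== SOURCE A (Python) =====
-- def strtline(y, array):
-- 	count_ahead = 0
-- 	count_prev = 0
-- 	for i in array[y:y+20]:
-- 		if i > 3:
-- 			count_ahead+= 1
-- 	for i in array[y-10:y]:
-- 		if i==0:
-- 			count_prev += 1
-- 	return count_ahead, count_prev
--
-- def endline(y, array):
-- 	count_ahead = 0
-- 	count_prev = 0
-- 	for i in array[y:y+10]:
-- 		if i==0:
-- 			count_ahead+= 1
-- 	for i in array[y-20:y]: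
-- 		if i >3:
-- 			count_prev += 1
-- 	return count_ahead, count_prev
--
-- def line_array(array):
-- 	list_x_upper = []
-- 	list_x_lower = []
-- 	for y in range(5, len(array)-5):
-- 		s_a, s_p = strtline(y, array)
-- 		e_a, e_p = endline(y, array)
-- 		if s_a>=16 and s_p>=7:
-- 			list_x_upper.append(y)
-- 			# noise_remove[y][:] = 255
-- 		if e_a>=5 and e_p>=16:
-- 			list_x_lower.append(y)
-- 			# noise_remove[y][:] = 255
-- 	return list_x_upper, list_x_lower
-- ===== SOURCE B (Python) =====
-- def line_array(array):
--     n = len(array)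
--     # prefix counts: pgt[k] = #{j < k : array[j] > 3}, pz[k] = #{j < k : array[j] == 0}
--     pgt = [0]
--     pz = [0]
--     g = 0
--     z = 0
--     for v in array:
--         if v > 3:
--             g += 1
--         if v == 0:
--             z += 1
--         pgt.append(g)
--         pz.append(z)
--
--     def cnt(p, a, b):
--         # count over the Python slice array[a:b], via the prefix table
--         lo = max(0, n + a) if a < 0 else min(a, n)
--         hi = max(0, n + b) if b < 0 else min(b, n)
--         return p[hi] - p[lo] if lo < hi else 0
--
--     ys = range(5, n - 5)
--     upper = [y for y in ys if cnt(pgt, y, y + 20) >= 16 and cnt(pz, y - 10, y) >= 7]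
--     lower = [y for y in ys if cnt(pz, y, y + 10) >= 5 and cnt(pgt, y - 20, y) >= 16]
--     return upper, lower
-- ===== Notes on version B (the rewrite author's own statement) =====
-- stated objective: faster
-- what changed: Replaces the per-row window rescans (four slice scans of up to 30 elements per y) by two prefix-count tables built in one pass, answering each window count in O(1) with Python slice-index clamping.
import Mathlib
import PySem

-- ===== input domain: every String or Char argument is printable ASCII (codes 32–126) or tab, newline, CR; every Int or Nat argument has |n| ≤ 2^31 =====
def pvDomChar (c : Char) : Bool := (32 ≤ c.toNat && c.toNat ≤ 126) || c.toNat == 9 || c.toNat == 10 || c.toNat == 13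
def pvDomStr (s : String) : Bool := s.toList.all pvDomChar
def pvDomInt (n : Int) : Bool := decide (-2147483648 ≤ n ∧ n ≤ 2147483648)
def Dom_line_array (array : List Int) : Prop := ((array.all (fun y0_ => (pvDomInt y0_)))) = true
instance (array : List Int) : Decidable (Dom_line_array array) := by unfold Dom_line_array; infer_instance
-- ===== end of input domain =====

-- B replaces A's per-row window rescans by prefix-count tables (one pass, O(1) per row query); same results.

-- ===== PORT A =====
def strtline (y : Int) (array : List Int) : Int × Int :=
  let count_ahead : Int := (PySem.List.slice array (some y) (some (y + 20))).foldl
      (fun c i => if i > 3 then c + 1 else c) 0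
  let count_prev : Int := (PySem.List.slice array (some (y - 10)) (some y)).foldl
      (fun c i => if i = 0 then c + 1 else c) 0
  (count_ahead, count_prev)

def endline (y : Int) (array : List Int) : Int × Int :=
  let count_ahead : Int := (PySem.List.slice array (some y) (some (y + 10))).foldl
      (fun c i => if i = 0 then c + 1 else c) 0
  let count_prev : Int := (PySem.List.slice array (some (y - 20)) (some y)).foldl
      (fun c i => if i > 3 then c + 1 else c) 0
  (count_ahead, count_prev)

def line_array (array : List Int) : List Int × List Int :=
  (PySem.List.pyRange 5 (PySem.List.len array - 5)).foldl
    (fun s y =>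
      let sp := strtline y array
      let ep := endline y array
      (if 16 ≤ sp.1 ∧ 7 ≤ sp.2 then s.1 ++ [y] else s.1,
       if 5 ≤ ep.1 ∧ 16 ≤ ep.2 then s.2 ++ [y] else s.2))
    ([], [])

-- ===== PORT B =====
-- one pass building both prefix-count tables (Source B's for-loop over array)
def altStep (s : (Int × Int) × List Int × List Int) (v : Int) : (Int × Int) × List Int × List Int :=
  let g := if v > 3 then s.1.1 + 1 else s.1.1
  let z := if v = 0 then s.1.2 + 1 else s.1.2
  ((g, z), s.2.1 ++ [g], s.2.2 ++ [z])

-- Python slice-index normalisation (Source B's lo/hi computation)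
def altNorm (n i : Int) : Int := if i < 0 then max 0 (n + i) else min i n

-- Source B's cnt: window count from a prefix table
def altCnt (n : Int) (p : List Int) (a b : Int) : Int :=
  let lo := altNorm n a
  let hi := altNorm n b
  if lo < hi then p.getD hi.toNat 0 - p.getD lo.toNat 0 else 0

def line_array_alt (array : List Int) : List Int × List Int :=
  let n : Int := (array.length : Int)
  let r := array.foldl altStep ((0, 0), [0], [0])
  let pgt := r.2.1
  let pz := r.2.2
  let ys := PySem.List.pyRange 5 (n - 5)
  (ys.filter (fun y => decide (16 ≤ altCnt n pgt y (y + 20)) && decide (7 ≤ altCnt n pz (y - 10) y)),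
   ys.filter (fun y => decide (5 ≤ altCnt n pz y (y + 10)) && decide (16 ≤ altCnt n pgt (y - 20) y)))

-- ===== PRECONDITION & SPEC =====
def Spec_line_array (array : List Int) (out : List Int × List Int) : Prop := out = line_array_alt array
instance (array : List Int) (out : List Int × List Int) : Decidable (Spec_line_array array out) := by unfold Spec_line_array; infer_instance

-- ===== CLAIM (what is proved, stated in full; the proofs are below) =====
def Claim_equal_line_array : Prop := ∀ (array : List Int), Dom_line_array array → Spec_line_array array (line_array array)

-- ===== LEMMAS AND PROOFS =====


-- countP over a contiguous window = difference of prefix counts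
theorem countP_drop_take (p : Int → Bool) (xs : List Int) (lo hi : Nat) (h : lo ≤ hi) :
    ((((xs.drop lo).take (hi - lo)).countP p : Int))
      = ((xs.take hi).countP p : Int) - ((xs.take lo).countP p : Int) := by
  have hsplit : xs.take hi = xs.take lo ++ (xs.drop lo).take (hi - lo) := by
    rw [← List.take_add]
    congr 1
    omega
  rw [hsplit, List.countP_append]
  push_cast
  ring

-- Source B's slice normalisation equals PySem's clampIdx
theorem altNorm_clamp (n : Nat) (i : Int) :
    altNorm (n : Int) i = ((PySem.List.clampIdx n i : Nat) : Int) := by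
  unfold altNorm PySem.List.clampIdx
  split_ifs <;> omega

-- a prefix table answering take-counts turns a slice count into altCnt
theorem count_slice (p : Int → Bool) (xs P : List Int) (a b : Int)
    (hP : ∀ k, k ≤ xs.length → P.getD k 0 = ((xs.take k).countP p : Int)) :
    ((PySem.List.slice xs (some a) (some b)).countP p : Int)
      = altCnt (xs.length : Int) P a b := by
  have hslice : PySem.List.slice xs (some a) (some b)
      = (xs.drop (PySem.List.clampIdx xs.length a)).take
          (PySem.List.clampIdx xs.length b - PySem.List.clampIdx xs.length a) := rfl
  unfold altCnt
  rw [altNorm_clamp, altNorm_clamp, hslice]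
  set lo := PySem.List.clampIdx xs.length a with hlo
  set hi := PySem.List.clampIdx xs.length b with hhi
  by_cases h : lo < hi
  · rw [if_pos (by exact_mod_cast h)]
    rw [countP_drop_take p xs lo hi (Nat.le_of_lt h)]
    rw [Int.toNat_natCast, Int.toNat_natCast,
        hP lo (PySem.List.clampIdx_le xs.length a), hP hi (PySem.List.clampIdx_le xs.length b)]
  · rw [if_neg (by exact_mod_cast h)]
    have : hi - lo = 0 := by omega
    simp [this]

-- the single pass of Source B builds exactly the two prefix-count tables
theorem altStep_foldl (xs : List Int) : ∀ (g z : Int) (P Z : List Int),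
    xs.foldl altStep ((g, z), P, Z) =
      ((g + ((xs.countP (fun v => decide (v > 3))) : Int),
        z + ((xs.countP (fun v => decide (v = 0))) : Int)),
       P ++ (List.range xs.length).map
          (fun k => g + (((xs.take (k + 1)).countP (fun v => decide (v > 3))) : Int)),
       Z ++ (List.range xs.length).map
          (fun k => z + (((xs.take (k + 1)).countP (fun v => decide (v = 0))) : Int))) := by
  induction xs with
  | nil => intro g z P Z; simp
  | cons v xs ih =>
    intro g z P Z
    rw [List.foldl_cons]
    show (xs.foldl altStep
      ((if v > 3 then g + 1 else g, if v = 0 then z + 1 else z),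
       P ++ [if v > 3 then g + 1 else g], Z ++ [if v = 0 then z + 1 else z])) = _
    rw [ih]
    refine Prod.ext (Prod.ext ?_ ?_) (Prod.ext ?_ ?_) <;>
      simp [List.countP_cons, List.range_succ_eq_map, List.map_map, Function.comp] <;>
      split_ifs <;> simp_all <;> intros <;> ring

-- reading the prefix table: entry k is the count over take k
theorem prefix_getD (p : Int → Bool) (xs : List Int) (k : Nat) (hk : k ≤ xs.length) :
    (((0 : Int) :: (List.range xs.length).map
        (fun j => (0 : Int) + (((xs.take (j + 1)).countP p) : Int))).getD k 0)
      = ((xs.take k).countP p : Int) := by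
  cases k with
  | zero => simp
  | succ j =>
    have hj : j < xs.length := by omega
    simp [List.getD, List.getElem?_map, List.getElem?_range hj]


theorem foldl_pair_append_if (p q : Int → Bool) (l : List Int) (u v : List Int) :
    l.foldl (fun s y => (if p y = true then s.1 ++ [y] else s.1,
                         if q y = true then s.2 ++ [y] else s.2)) (u, v)
      = (u ++ l.filter p, v ++ l.filter q) := by
  rw [PySem.List.foldl_prod_mk (fun a y => if p y = true then a ++ [y] else a)
        (fun b y => if q y = true then b ++ [y] else b) l u v]
  refine Prod.ext ?_ ?_
  · simpa using PySem.List.foldl_append_if p id l u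
  · simpa using PySem.List.foldl_append_if q id l v

theorem line_array_key (array : List Int) : line_array array = line_array_alt array := by
  have hPg : ∀ k, k ≤ array.length →
      ((array.foldl altStep ((0, 0), [0], [0])).2.1).getD k 0
        = (((array.take k).countP (fun v => decide (v > 3))) : Int) := by
    intro k hk
    rw [altStep_foldl]
    simpa using prefix_getD (fun v => decide (v > 3)) array k hk
  have hPz : ∀ k, k ≤ array.length →
      ((array.foldl altStep ((0, 0), [0], [0])).2.2).getD k 0
        = (((array.take k).countP (fun v => decide (v = 0))) : Int) := by
    intro k hk
    rw [altStep_foldl]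
    simpa using prefix_getD (fun v => decide (v = 0)) array k hk
  have hc1 : ∀ (a b : Int),
      ((PySem.List.slice array (some a) (some b)).foldl (fun c i => if i > 3 then c + 1 else c) 0)
        = altCnt (array.length : Int) ((array.foldl altStep ((0, 0), [0], [0])).2.1) a b := by
    intro a b
    have h0 := PySem.List.foldl_count_if (fun i => decide (3 < i))
      (PySem.List.slice array (some a) (some b)) 0
    simp only [decide_eq_true_eq] at h0
    rw [h0, zero_add]
    exact count_slice (fun v => decide (3 < v)) array _ a b hPg
  have hc0 : ∀ (a b : Int),
      ((PySem.List.slice array (some a) (some b)).foldl (fun c i => if i = 0 then c + 1 else c) 0)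
        = altCnt (array.length : Int) ((array.foldl altStep ((0, 0), [0], [0])).2.2) a b := by
    intro a b
    have h0 := PySem.List.foldl_count_if (fun i => decide (i = 0))
      (PySem.List.slice array (some a) (some b)) 0
    simp only [decide_eq_true_eq] at h0
    rw [h0, zero_add]
    exact count_slice (fun v => decide (v = 0)) array _ a b hPz
  unfold line_array line_array_alt
  simp only [PySem.List.len_eq]
  have hfun : (fun (s : List Int × List Int) (y : Int) =>
      let sp := strtline y array
      let ep := endline y array
      (if 16 ≤ sp.1 ∧ 7 ≤ sp.2 then s.1 ++ [y] else s.1,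
       if 5 ≤ ep.1 ∧ 16 ≤ ep.2 then s.2 ++ [y] else s.2))
    = (fun s y => (if (fun y => decide (16 ≤ (strtline y array).1 ∧ 7 ≤ (strtline y array).2)) y = true then s.1 ++ [y] else s.1,
                   if (fun y => decide (5 ≤ (endline y array).1 ∧ 16 ≤ (endline y array).2)) y = true then s.2 ++ [y] else s.2)) := by
    funext s y
    simp
  rw [hfun, foldl_pair_append_if]
  simp only [List.nil_append]
  refine Prod.ext ?_ ?_
  · apply List.filter_congr
    intro y _
    simp only [strtline, Bool.decide_and]
    rw [hc1 y (y + 20), hc0 (y - 10) y]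
  · apply List.filter_congr
    intro y _
    simp only [endline, Bool.decide_and]
    rw [hc0 y (y + 10), hc1 (y - 20) y]


-- ===== VERDICT (by name: the statement is the Claim_ definition above) =====
theorem line_array_spec : Claim_equal_line_array := by
  intro array _
  unfold Spec_line_array
  exact line_array_key array
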